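-- pv_equiv track=rewrite | github.com/MatthewHowe/WIBAM | src/lib/utils/utils.py | objects_to_attribute_list
-- ===== SOURCE A (Python) =====
-- def objects_to_attribute_list(objects):
--     attributes = {}
--     if isinstance(objects, list):
--         objects = {i: objects[i] for i in range(len(objects))}
--     for obj, obj_attributes in objects.items():
--         for key, val in obj_attributes.items():
--             if key in attributes:
--                 attributes[key].append(val)
--             else:
--                 attributes[key] = [val]
--
--     return attributes
-- ===== SOURCE B (Python) =====
-- def objects_to_attribute_list(objects):
--     objs = list(objects) if isinstance(objects, list) else list(objects.values())
--     keys = list(dict.fromkeys(k for obj in objs for k in obj))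
--     return {k: [obj[k] for obj in objs if k in obj] for k in keys}
-- ===== Notes on version B (the rewrite author's own statement) =====
-- stated objective: alternative
-- what changed: B first collects the attribute keys in first-appearance order, then builds the result column-by-column with one scan of the objects per key, instead of A's single row-by-row pass that appends into a growing dict.
import Mathlib
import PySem

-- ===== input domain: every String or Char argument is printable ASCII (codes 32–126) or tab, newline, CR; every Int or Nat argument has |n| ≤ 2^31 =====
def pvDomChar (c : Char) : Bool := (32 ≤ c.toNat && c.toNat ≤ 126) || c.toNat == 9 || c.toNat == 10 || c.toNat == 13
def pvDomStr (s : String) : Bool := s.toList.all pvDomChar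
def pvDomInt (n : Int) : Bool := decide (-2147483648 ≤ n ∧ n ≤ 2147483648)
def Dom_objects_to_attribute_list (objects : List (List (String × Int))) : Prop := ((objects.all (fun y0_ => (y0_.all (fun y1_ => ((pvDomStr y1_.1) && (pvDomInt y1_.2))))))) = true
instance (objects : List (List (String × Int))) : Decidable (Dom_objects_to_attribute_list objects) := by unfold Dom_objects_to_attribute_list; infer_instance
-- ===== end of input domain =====

-- B rebuilds the dict column-by-column (keys first, then one value list per key) instead of A's
-- row-by-row append loop; objective: alternative decomposition, same result.

-- ===== PORT A =====
-- row-by-row: one running dict, appending each value to its key's list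
def objects_to_attribute_list (objects : List (List (String × Int))) : List (String × List Int) :=
  (objects.foldl (fun attributes obj_attributes =>
      (PySem.Dict.ofList obj_attributes).items.foldl (fun attributes kv =>
        if attributes.contains kv.1 then
          attributes.insert kv.1 (attributes.getD kv.1 [] ++ [kv.2])
        else
          attributes.insert kv.1 [kv.2]) attributes)
    (PySem.Dict.empty : PySem.Dict String (List Int))).items

-- ===== PORT B =====
-- column-by-column: collect keys in first-appearance order, then one scan of the objects per key
def objects_to_attribute_list_alt (objects : List (List (String × Int))) : List (String × List Int) :=
  (PySem.List.dedup ((objects.map (fun obj => PySem.Dict.ofList obj)).flatMap (fun d => d.keys))).map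
    (fun k => (k, (objects.map (fun obj => PySem.Dict.ofList obj)).filterMap (fun d => d.get? k)))

-- ===== PRECONDITION & SPEC =====
def Spec_objects_to_attribute_list (objects : List (List (String × Int))) (out : List (String × List Int)) : Prop := out = objects_to_attribute_list_alt objects
instance (objects : List (List (String × Int))) (out : List (String × List Int)) : Decidable (Spec_objects_to_attribute_list objects out) := by unfold Spec_objects_to_attribute_list; infer_instance

-- ===== CLAIM (what is proved, stated in full; the proofs are below) =====
def Claim_equal_objects_to_attribute_list : Prop := ∀ (objects : List (List (String × Int))), Dom_objects_to_attribute_list objects → Spec_objects_to_attribute_list objects (objects_to_attribute_list objects)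

-- ===== LEMMAS AND PROOFS =====

-- A's if/else step is exactly dict-modify with default []
lemma step_eq_modify (d : PySem.Dict String (List Int)) (p : String × Int) :
    (if d.contains p.1 then d.insert p.1 (d.getD p.1 [] ++ [p.2]) else d.insert p.1 [p.2])
      = d.modify p.1 [] (· ++ [p.2]) := by
  by_cases h : d.contains p.1
  · simp [h, PySem.Dict.modify]
  · rw [if_neg (by simp [h]), PySem.Dict.modify,
      PySem.Dict.getD_of_not_contains d [] (by simp [h])]
    simp

-- a dict with Nodup keys: the matching items for k are exactly get? k
lemma filter_items_eq_get? (l : List (String × Int)) (k : String)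
    (h : (l.map Prod.fst).Nodup) :
    ((l.filter (fun p : String × Int => p.1 == k)).map (fun p : String × Int => p.2))
      = ((PySem.Dict.mk l).get? k).toList := by
  induction l with
  | nil => simp [PySem.Dict.get?]
  | cons p rest ih =>
    simp only [List.map_cons, List.nodup_cons] at h
    rw [PySem.Dict.get?_mk_cons]
    by_cases hk : p.1 = k
    · subst hk
      have : rest.filter (fun q => q.1 == p.1) = [] := by
        apply List.filter_eq_nil_iff.mpr
        intro q hq hq'
        have hq1 : q.1 = p.1 := by simpa using hq'
        have hm : p.1 ∈ rest.map Prod.fst := hq1 ▸ List.mem_map_of_mem hq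
        exact h.1 hm
      simp [this]
    · simp only [List.filter_cons, show (p.1 == k) = false by simpa using hk]
      simpa using ih h.2

lemma filterMap_get?_eq (objs : List (List (String × Int))) (k : String) :
    (objs.map (fun obj => PySem.Dict.ofList obj)).filterMap (fun d => d.get? k)
      = (((objs.map (fun obj => PySem.Dict.ofList obj)).flatMap (fun d => d.items)).filter
          (fun p => p.1 == k)).map (fun p => p.2) := by
  induction objs with
  | nil => simp
  | cons obj rest ih =>
    have hnd : ((PySem.Dict.ofList obj).items.map Prod.fst).Nodup :=
      PySem.Dict.nodup_keys_ofList obj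
    simp only [List.map_cons, List.filterMap_cons, List.flatMap_cons, List.filter_append,
      List.map_append, ← ih]
    rw [filter_items_eq_get? _ k hnd]
    cases (PySem.Dict.ofList obj).get? k <;> simp

-- ===== VERDICT (by name: the statement is the Claim_ definition above) =====
theorem objects_to_attribute_list_spec : Claim_equal_objects_to_attribute_list := by
  intro objects _
  unfold Spec_objects_to_attribute_list objects_to_attribute_list objects_to_attribute_list_alt
  -- rewrite A's double loop as one modify-fold over the flattened item list
  set objs := objects.map (fun obj => PySem.Dict.ofList obj) with hobjs
  set pairs := objs.flatMap (fun d => d.items) with hpairs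
  have hA : (objects.foldl (fun attributes obj_attributes =>
        (PySem.Dict.ofList obj_attributes).items.foldl (fun attributes kv =>
          if attributes.contains kv.1 then
            attributes.insert kv.1 (attributes.getD kv.1 [] ++ [kv.2])
          else
            attributes.insert kv.1 [kv.2]) attributes)
      (PySem.Dict.empty : PySem.Dict String (List Int)))
      = pairs.foldl (fun d p => d.modify p.1 [] (· ++ [p.2])) PySem.Dict.empty := by
    rw [hpairs, hobjs, List.flatMap_map, List.foldl_flatMap]
    congr 1
    funext d obj
    exact PySem.List.foldl_congr_mem _ _ _ _ (fun d' p _ => step_eq_modify d' p)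
  rw [hA]
  set D := pairs.foldl (fun d p => d.modify p.1 [] (· ++ [p.2]))
    (PySem.Dict.empty : PySem.Dict String (List Int)) with hD
  have hkeysD : D.keys = PySem.Set.ofList (pairs.map Prod.fst) := by
    rw [hD, PySem.Dict.keys_foldl_modify_key pairs Prod.fst [] (fun _ p => (· ++ [p.2]))]
    simp only [PySem.Dict.keys_empty, PySem.Set.update_nil_left]
  have hnd : D.keys.Nodup := by
    rw [hkeysD]; exact PySem.Set.nodup_ofList _
  rw [PySem.Dict.items_eq_map_keys D hnd []]
  have hkeysB : PySem.List.dedup (objs.flatMap (fun d => d.keys))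
      = PySem.Set.ofList (pairs.map Prod.fst) := by
    have : objs.flatMap (fun d => d.keys) = pairs.map Prod.fst := by
      rw [hpairs, List.map_flatMap]; rfl
    rw [this]; rfl
  rw [hkeysB, ← hkeysD]
  apply List.map_congr_left
  intro k _
  have hgetD : D.getD k [] = (pairs.filter (fun p => p.1 == k)).map (fun p => p.2) := by
    rw [hD, PySem.Dict.getD_foldl_modify_append]
    simp
  rw [hgetD, filterMap_get?_eq]
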